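-- pv_equiv track=rewrite | github.com/BOKJUNSOO/Study | 2.Python/3.Baek/baek5.py | dial
-- ===== SOURCE A (Python) =====
-- def dial(alpha : str):
--     list = ["abc","def","ghi","ABC","DEF","GHI","JKL","MNO","PQRS","TUV","WXYZ"]
--     second = 0
--     for i in range(len(alpha)):
--         for j in range(len(list)):
--             if alpha[i] in list[j]:
--                 second += j
--             else:
--                 continue
--     return second
-- ===== SOURCE B (Python) =====
-- def dial(alpha: str):
--     groups = ["abc", "def", "ghi", "ABC", "DEF", "GHI", "JKL", "MNO", "PQRS", "TUV", "WXYZ"]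
--     counts = {}
--     for ch in alpha:
--         counts[ch] = counts.get(ch, 0) + 1
--     total = 0
--     for idx, grp in enumerate(groups):
--         for ch in grp:
--             total += idx * counts.get(ch, 0)
--     return total
-- ===== Notes on version B (the rewrite author's own statement) =====
-- stated objective: faster
-- what changed: B inverts the iteration: it builds a character histogram of the input in one pass, then aggregates group-by-group, adding idx * count[ch] for each character of each group, instead of A's per-input-character scan over all 11 groups; correct because summation order does not matter.
import Mathlib
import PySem

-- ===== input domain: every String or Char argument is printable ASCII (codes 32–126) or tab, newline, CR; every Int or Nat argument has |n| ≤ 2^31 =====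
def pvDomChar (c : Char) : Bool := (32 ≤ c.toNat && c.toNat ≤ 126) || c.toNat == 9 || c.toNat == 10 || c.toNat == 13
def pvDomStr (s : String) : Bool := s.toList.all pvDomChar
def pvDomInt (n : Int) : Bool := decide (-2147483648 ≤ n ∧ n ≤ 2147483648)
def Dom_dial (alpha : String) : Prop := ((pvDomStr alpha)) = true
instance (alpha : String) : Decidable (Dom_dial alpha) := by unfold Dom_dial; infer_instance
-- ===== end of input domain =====

-- B inverts the iteration: one counting pass over the input, then one group-by-group
-- aggregation adding idx * count[ch]; same value because addition is commutative (objective: faster, measured).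

-- ===== PORT A =====
def dialGroupsA : List String := ["abc", "def", "ghi", "ABC", "DEF", "GHI", "JKL", "MNO", "PQRS", "TUV", "WXYZ"]

-- alpha[i] / list[j] are always in range here, so pyGetD with a default is exact
def dial (alpha : String) : Int :=
  (PySem.List.pyRange 0 (PySem.Str.len alpha) 1).foldl
    (fun second i =>
      (PySem.List.pyRange 0 (PySem.List.len dialGroupsA) 1).foldl
        (fun second j =>
          if PySem.Chars.isIn [PySem.List.pyGetD alpha.toList i ' ']
               (PySem.List.pyGetD dialGroupsA j "").toList
          then second + j else second)
        second)
    0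

-- ===== PORT B =====
def dialGroupsB : List String := ["abc", "def", "ghi", "ABC", "DEF", "GHI", "JKL", "MNO", "PQRS", "TUV", "WXYZ"]

def dial_alt (alpha : String) : Int :=
  let counts := alpha.toList.foldl (fun d ch => d.insert ch (d.getD ch 0 + 1)) PySem.Dict.empty
  (PySem.List.enumerate dialGroupsB 0).foldl
    (fun total p => p.2.toList.foldl (fun total ch => total + p.1 * counts.getD ch 0) total) 0

-- ===== PRECONDITION & SPEC =====
def Spec_dial (alpha : String) (out : Int) : Prop := out = dial_alt alpha
instance (alpha : String) (out : Int) : Decidable (Spec_dial alpha out) := by unfold Spec_dial; infer_instance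

-- ===== CLAIM (what is proved, stated in full; the proofs are below) =====
def Claim_equal_dial : Prop := ∀ (alpha : String), Dom_dial alpha → Spec_dial alpha (dial alpha)

-- ===== LEMMAS AND PROOFS =====

-- A's inner loop over the group list, for one character, starting from accumulator acc
def dialInner (acc : Int) (c : Char) : Int :=
  (PySem.List.pyRange 0 (PySem.List.len dialGroupsA) 1).foldl
    (fun second j =>
      if PySem.Chars.isIn [c] (PySem.List.pyGetD dialGroupsA j "").toList
      then second + j else second)
    acc

theorem dialInner_shift (acc : Int) (c : Char) :
    dialInner acc c = acc + dialInner 0 c := by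
  unfold dialInner
  have h : ∀ (a : Int),
      (PySem.List.pyRange 0 (PySem.List.len dialGroupsA) 1).foldl
        (fun second j =>
          if PySem.Chars.isIn [c] (PySem.List.pyGetD dialGroupsA j "").toList
          then second + j else second) a
      = a + ((PySem.List.pyRange 0 (PySem.List.len dialGroupsA) 1).map
          (fun j => if PySem.Chars.isIn [c] (PySem.List.pyGetD dialGroupsA j "").toList
                    then j else 0)).sum := by
    intro a
    rw [PySem.List.foldl_congr_mem (g := fun second j =>
      second + (if PySem.Chars.isIn [c] (PySem.List.pyGetD dialGroupsA j "").toList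
                then j else 0))]
    · exact PySem.List.foldl_add _ _ _
    · intro acc x _; split_ifs <;> simp
  rw [h, h 0, zero_add]

theorem sum_flatMap_int {α : Type} (l : List α) (f : α → List Int) :
    (l.flatMap f).sum = (l.map (fun x => (f x).sum)).sum := by
  induction l with
  | nil => simp
  | cons a l ih => simp [List.flatMap_cons, ih]

-- the (group index, character) pairs of B's group table, flattened (proof-side helper)
def dialPairs : List (Int × Char) :=
  (PySem.List.enumerate dialGroupsB 0).flatMap (fun p => p.2.toList.map (fun c => (p.1, c)))

theorem dial_eq_sum (alpha : String) :
    dial alpha = (alpha.toList.map (dialInner 0)).sum := by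
  unfold dial
  rw [PySem.Str.len_eq]
  refine Eq.trans (PySem.List.foldl_pyRange_zero_pyGetD' alpha.toList ' ' dialInner 0) ?_
  rw [PySem.List.foldl_congr_mem (g := fun acc c => acc + dialInner 0 c)]
  · rw [PySem.List.foldl_add]; simp
  · intro acc c _; exact dialInner_shift acc c

theorem dial_alt_eq_sum (alpha : String) :
    dial_alt alpha = (dialPairs.map (fun q => q.1 * (alpha.toList.count q.2 : Int))).sum := by
  unfold dial_alt
  have hc : ∀ ch : Char,
      (alpha.toList.foldl (fun d ch => d.insert ch (d.getD ch 0 + 1))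
        PySem.Dict.empty).getD ch 0 = (alpha.toList.count ch : Int) := by
    intro ch
    rw [PySem.Dict.getD_foldl_insert_add_one]
    simp [PySem.Dict.getD_empty]
  simp only
  rw [PySem.List.foldl_congr_mem
      (g := fun total p => total + ((p.2.toList.map (fun ch =>
        p.1 * (alpha.toList.count ch : Int)))).sum)]
  · rw [PySem.List.foldl_add, zero_add]
    unfold dialPairs
    rw [List.map_flatMap]
    rw [sum_flatMap_int]
    rfl
  · intro acc p _
    rw [PySem.List.foldl_congr_mem
        (g := fun total ch => total + p.1 * (alpha.toList.count ch : Int))]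
    · exact PySem.List.foldl_add _ _ _
    · intro a ch _; rw [hc]

-- the per-character weight B's pair list assigns, as a sum of indicators
def dialWeight (c : Char) : Int :=
  (dialPairs.map (fun q => q.1 * (if q.2 = c then (1 : Int) else 0))).sum

set_option maxRecDepth 8192 in
theorem dialWeight_eq_inner (c : Char) (hc : pvDomChar c = true) :
    dialWeight c = dialInner 0 c := by
  have hlt : c.toNat < 128 := by
    simp only [pvDomChar, Bool.or_eq_true, Bool.and_eq_true, decide_eq_true_eq,
      beq_iff_eq] at hc
    omega
  have key : ∀ n ∈ List.range 128,
      dialWeight (Char.ofNat n) = dialInner 0 (Char.ofNat n) := by decide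
  have := key c.toNat (List.mem_range.mpr hlt)
  rwa [Char.ofNat_toNat] at this

theorem sums_agree (xs : List Char) (hdom : ∀ c ∈ xs, pvDomChar c = true) :
    (dialPairs.map (fun q => q.1 * (xs.count q.2 : Int))).sum
      = (xs.map (dialInner 0)).sum := by
  induction xs with
  | nil => simp
  | cons c xs ih =>
    have hstep : ∀ q : Int × Char,
        q.1 * ((c :: xs).count q.2 : Int)
          = q.1 * (xs.count q.2 : Int) + q.1 * (if q.2 = c then (1 : Int) else 0) := by
      intro q
      rw [List.count_cons]
      push_cast
      rcases eq_or_ne q.2 c with h | h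
      · simp [h]; ring
      · simp [h, Ne.symm h]
    calc (dialPairs.map (fun q => q.1 * ((c :: xs).count q.2 : Int))).sum
        = (dialPairs.map (fun q =>
            q.1 * (xs.count q.2 : Int) + q.1 * (if q.2 = c then (1 : Int) else 0))).sum := by
          exact congrArg List.sum (List.map_congr_left (fun q _ => hstep q))
      _ = (dialPairs.map (fun q => q.1 * (xs.count q.2 : Int))).sum + dialWeight c := by
          rw [PySem.List.sum_map_add_int]; rfl
      _ = (xs.map (dialInner 0)).sum + dialInner 0 c := by
          rw [ih (fun d hd => hdom d (List.mem_cons_of_mem _ hd)),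
            dialWeight_eq_inner c (hdom c List.mem_cons_self)]
      _ = ((c :: xs).map (dialInner 0)).sum := by simp; ring

-- ===== VERDICT (by name: the statement is the Claim_ definition above) =====
theorem dial_spec : Claim_equal_dial := by
  intro alpha hdom
  unfold Spec_dial
  rw [dial_eq_sum, dial_alt_eq_sum]
  have hd : ∀ c ∈ alpha.toList, pvDomChar c = true := by
    intro c hcm
    have := (List.all_eq_true.mp hdom) c hcm
    simpa using this
  exact (sums_agree alpha.toList hd).symm
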